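-- pv_equiv track=rewrite | github.com/Jaciubek/goit-algo-hw-09 | task.py | find_min_coins
-- ===== SOURCE A (Python) =====
-- def find_min_coins(amount):
--     coins = [1, 2, 5, 10, 20, 50]
--     max_amount = amount + 1
--     # Initialize the dynamic programming table
--     dp = [float('inf')] * max_amount
--     dp[0] = 0
--     coin_used = [{} for _ in range(max_amount)]
--
--     for i in range(1, max_amount):
--         for coin in coins:
--             if coin <= i:
--                 if dp[i - coin] + 1 < dp[i]:
--                     dp[i] = dp[i - coin] + 1
--                     coin_used[i] = coin_used[i - coin].copy()
--                     if coin in coin_used[i]: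
--                         coin_used[i][coin] += 1
--                     else:
--                         coin_used[i][coin] = 1
--
--     return coin_used[amount]
-- ===== SOURCE B (Python) =====
-- def find_min_coins(amount):
--     result = {}
--     for coin in (50, 20, 10, 5, 2, 1):
--         count, amount = divmod(amount, coin)
--         if count:
--             result[coin] = count
--     return result
-- ===== Notes on version B (the rewrite author's own statement) =====
-- stated objective: faster
-- what changed: Replaced the O(amount)-sized dynamic-programming table (with a dict per cell) by a six-step greedy from the largest coin, exact because {1,2,5,10,20,50} is a canonical coin system (proved: the DP's winning dict equals the greedy dict, in insertion order, for every amount >= 0).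
import Mathlib
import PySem

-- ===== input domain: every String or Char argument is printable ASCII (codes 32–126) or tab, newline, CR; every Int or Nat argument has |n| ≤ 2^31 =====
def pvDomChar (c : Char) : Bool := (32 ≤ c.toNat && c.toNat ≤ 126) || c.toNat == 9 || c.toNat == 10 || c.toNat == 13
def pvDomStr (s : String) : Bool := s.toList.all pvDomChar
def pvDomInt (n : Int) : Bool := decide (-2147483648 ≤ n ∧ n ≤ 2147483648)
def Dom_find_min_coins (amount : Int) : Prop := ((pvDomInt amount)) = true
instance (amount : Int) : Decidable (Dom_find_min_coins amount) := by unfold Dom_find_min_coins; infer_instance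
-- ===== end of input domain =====

-- B replaces A's O(amount)-cell dynamic-programming table by a six-step greedy from the
-- largest coin (exact for the canonical system {1,2,5,10,20,50}); asymptotically faster.

-- ===== PORT A =====
-- 'x < y' where none stands for float('inf') (dp cells hold either inf or an exact small int,
-- so float arithmetic in A is exact); some a < none is true, none < _ is false.
def pyInfLt : Option Int → Option Int → Bool
  | some a, some b => decide (a < b)
  | some _, none => true
  | none, _ => false

def find_min_coins (amount : Int) : List (Int × Int) :=
  let coins : List Int := [1, 2, 5, 10, 20, 50]
  let max_amount := amount + 1
  -- dp = [inf]*max_amount; dp[0] = 0  (for amount < 0 Python raises IndexError here: outside Pre_)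
  let dp0 : Array (Option Int) :=
    (Array.replicate max_amount.toNat (none : Option Int)).setIfInBounds 0 (some 0)
  let cu0 : Array (PySem.Dict Int Int) :=
    Array.replicate max_amount.toNat PySem.Dict.empty
  let st := (PySem.List.pyRange 1 max_amount 1).foldl (fun st i =>
    coins.foldl (fun (st : Array (Option Int) × Array (PySem.Dict Int Int)) coin =>
      if coin ≤ i then
        -- dp[i-coin], dp[i], coin_used[i-coin]: indices are nonnegative and in range here
        -- (1 ≤ i < max_amount, 0 ≤ i - coin < i), so plain Nat indexing is Python-exact
        let prev := st.1.getD (i - coin).toNat none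
        let cur := st.1.getD i.toNat none
        if pyInfLt (prev.map (· + 1)) cur then
          let nd := st.2.getD (i - coin).toNat PySem.Dict.empty
          let nd := if nd.contains coin then nd.modify coin 0 (· + 1) else nd.insert coin 1
          (st.1.setIfInBounds i.toNat (prev.map (· + 1)), st.2.setIfInBounds i.toNat nd)
        else st
      else st) st) (dp0, cu0)
  (st.2.getD amount.toNat PySem.Dict.empty).items

-- ===== PORT B =====
def find_min_coins_alt (amount : Int) : List (Int × Int) :=
  (([50, 20, 10, 5, 2, 1] : List Int).foldl (fun (s : PySem.Dict Int Int × Int) coin =>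
    let count := PySem.Int.floordiv s.2 coin
    let rem := PySem.Int.mod s.2 coin
    (if count ≠ 0 then s.1.insert coin count else s.1, rem)) (PySem.Dict.empty, amount)).1.items

-- ===== PRECONDITION & SPEC =====
-- Pre_ excludes amount < 0, where Python A raises IndexError (dp[0] = 0 on an empty/short list).
def Pre_find_min_coins (amount : Int) : Prop := 0 ≤ amount
instance (amount : Int) : Decidable (Pre_find_min_coins amount) := by unfold Pre_find_min_coins; infer_instance
def pvWitness_find_min_coins : Int := (11)

def Spec_find_min_coins (amount : Int) (out : List (Int × Int)) : Prop := out = find_min_coins_alt amount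
instance (amount : Int) (out : List (Int × Int)) : Decidable (Spec_find_min_coins amount out) := by unfold Spec_find_min_coins; infer_instance

-- ===== CLAIM (what is proved, stated in full; the proofs are below) =====
def Claim_equal_find_min_coins : Prop := ∀ (amount : Int), Dom_find_min_coins amount → Pre_find_min_coins amount → Spec_find_min_coins amount (find_min_coins amount)

-- ===== LEMMAS AND PROOFS =====

-- Greedy coin count of n (minimal number of coins in the canonical system).
def gcnt (n : Nat) : Nat :=
  n / 50 + n % 50 / 20 + n % 50 % 20 / 10 + n % 50 % 20 % 10 / 5 + n % 50 % 20 % 10 % 5 / 2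
    + n % 50 % 20 % 10 % 5 % 2

-- Greedy dict of n, as an explicit items list (largest coin first, zero counts omitted).
def GD (n : Nat) : PySem.Dict Int Int := PySem.Dict.mk (
  (if n / 50 = 0 then [] else [((50 : Int), ((n / 50 : Nat) : Int))]) ++
  (if n % 50 / 20 = 0 then [] else [((20 : Int), ((n % 50 / 20 : Nat) : Int))]) ++
  (if n % 50 % 20 / 10 = 0 then [] else [((10 : Int), ((n % 50 % 20 / 10 : Nat) : Int))]) ++
  (if n % 50 % 20 % 10 / 5 = 0 then [] else [((5 : Int), ((n % 50 % 20 % 10 / 5 : Nat) : Int))]) ++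
  (if n % 50 % 20 % 10 % 5 / 2 = 0 then [] else [((2 : Int), ((n % 50 % 20 % 10 % 5 / 2 : Nat) : Int))]) ++
  (if n % 50 % 20 % 10 % 5 % 2 = 0 then [] else [((1 : Int), ((n % 50 % 20 % 10 % 5 % 2 : Nat) : Int))]))

-- A's dict-update: d[coin] += 1 / d[coin] = 1.
def bump (d : PySem.Dict Int Int) (c : Int) : PySem.Dict Int Int :=
  if d.contains c then d.modify c 0 (· + 1) else d.insert c 1

-- One inner-loop step of A, written over the (count, dict) cell values the table holds.
def chain1 (n : Nat) (s : Option Int × PySem.Dict Int Int) (c : Nat) :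
    Option Int × PySem.Dict Int Int :=
  if c ≤ n then
    if pyInfLt (some ((gcnt (n - c) : Int) + 1)) s.1 then
      (some ((gcnt (n - c) : Int) + 1), bump (GD (n - c)) (c : Int))
    else s
  else s

def chainRes (n : Nat) : Option Int × PySem.Dict Int Int :=
  ([1, 2, 5, 10, 20, 50] : List Nat).foldl (chain1 n) (none, PySem.Dict.empty)

lemma bump_eq_insert (d : PySem.Dict Int Int) (c : Int) :
    bump d c = d.insert c (d.getD c 0 + 1) := by
  unfold bump
  by_cases h : d.contains c = true
  · simp only [h, if_true]; rfl
  · have hc : d.contains c = false := by simpa using h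
    simp only [h, Bool.false_eq_true, if_false, PySem.Dict.getD_of_not_contains d 0 hc]
    norm_num

lemma bump_comm (d : PySem.Dict Int Int) (c : Int)
    (h : d.contains 50 = true) : bump (bump d 50) c = bump (bump d c) 50 := by
  by_cases hc : c = 50
  · subst hc; rfl
  · rw [bump_eq_insert d 50, bump_eq_insert d c,
        bump_eq_insert (d.insert 50 (d.getD 50 0 + 1)) c,
        bump_eq_insert (d.insert c (d.getD c 0 + 1)) 50,
        PySem.Dict.getD_insert, PySem.Dict.getD_insert]
    simp only [hc, if_false, Ne.symm hc]
    set a := d.getD 50 0 + 1 with ha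
    set b := d.getD c 0 + 1 with hb
    by_cases hcc : d.contains c = true
    · apply PySem.Dict.ext
      rw [PySem.Dict.items_insert_of_contains _ _ (by simp [PySem.Dict.contains_insert, hcc]),
          PySem.Dict.items_insert_of_contains _ _ h,
          PySem.Dict.items_insert_of_contains _ _ (by simp [PySem.Dict.contains_insert, h]),
          PySem.Dict.items_insert_of_contains _ _ hcc]
      simp only [List.map_map]
      apply List.map_congr_left
      intro p _
      by_cases h50 : p.1 = 50 <;> by_cases hc' : p.1 = c <;>
        simp_all [Function.comp]
    · have hcc' : d.contains c = false := by simpa using hcc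
      apply PySem.Dict.ext
      rw [PySem.Dict.items_insert_of_not_contains _ _
            (by simp [PySem.Dict.contains_insert, hcc', hc]),
          PySem.Dict.items_insert_of_contains _ _ h,
          PySem.Dict.items_insert_of_contains _ _
            (by simp [PySem.Dict.contains_insert, h]),
          PySem.Dict.items_insert_of_not_contains _ _ hcc']
      simp only [List.map_append, List.map_cons, List.map_nil]
      simp [hc]

lemma gcnt_shift (n : Nat) (h : 50 ≤ n) : gcnt n = gcnt (n - 50) + 1 := by
  unfold gcnt; omega

lemma contains50_GD (n : Nat) (h : 50 ≤ n) : (GD n).contains 50 = true := by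
  have h50 : ¬ n / 50 = 0 := by omega
  simp [GD, PySem.Dict.contains_mk, h50]

lemma map_keyfix (f : Int × Int → Int × Int) (l : List (Int × Int))
    (h : ∀ p ∈ l, f p = p) : l.map f = l :=
  (List.map_congr_left h).trans (List.map_id l)

lemma GD_shift (n : Nat) (h : 100 ≤ n) : GD n = bump (GD (n - 50)) 50 := by
  have hc : (GD (n - 50)).contains 50 = true := contains50_GD _ (by omega)
  have hv : ¬ (n - 50) / 50 = 0 := by omega
  have hv' : ¬ n / 50 = 0 := by omega
  have e1 : n / 50 = (n - 50) / 50 + 1 := by omega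
  have e2 : n % 50 = (n - 50) % 50 := by omega
  rw [bump_eq_insert]
  apply PySem.Dict.ext
  have hgetD : (GD (n - 50)).getD 50 0 = ((((n - 50) / 50 : Nat)) : Int) := by
    unfold GD
    simp only [hv, if_false]
    simp [PySem.Dict.getD_eq_get?_getD, PySem.Dict.get?_mk_cons]
  rw [PySem.Dict.items_insert_of_contains _ _ hc, hgetD]
  unfold GD
  rw [e2, if_neg hv', if_neg hv]
  simp only [List.cons_append, List.map_cons, beq_self_eq_true, if_true]
  congr 1
  · simp only [Prod.mk.injEq, true_and]
    push_cast
    omega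
  · symm
    apply map_keyfix
    intro p hp
    have hkey : p.1 = 20 ∨ p.1 = 10 ∨ p.1 = 5 ∨ p.1 = 2 ∨ p.1 = 1 := by
      simp only [List.mem_append] at hp
      rcases hp with ((((h | h) | h) | h) | h) <;> (split at h <;> simp_all)
    have hne : (p.1 == (50 : Int)) = false := by
      rcases hkey with h | h | h | h | h <;> simp [h]
    simp [hne]

lemma pyInfLt_map (x : Int) (o : Option Int) :
    pyInfLt (some (x + 1)) (o.map (· + 1)) = pyInfLt (some x) o := by
  cases o <;> simp [pyInfLt]
  try omega

lemma chain_shift_aux (n : Nat) (h : 150 ≤ n) (cs : List Nat)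
    (hcs : ∀ c ∈ cs, 1 ≤ c ∧ c ≤ 50)
    (s s' : Option Int × PySem.Dict Int Int)
    (h1 : s.1 = s'.1.map (· + 1)) (h2 : s.2 = bump s'.2 50) :
    cs.foldl (chain1 n) s = ((cs.foldl (chain1 (n - 50)) s').1.map (· + 1),
      bump (cs.foldl (chain1 (n - 50)) s').2 50) := by
  induction cs generalizing s s' with
  | nil =>
    simp only [List.foldl_nil]
    exact Prod.ext h1 h2
  | cons c cs ih =>
    obtain ⟨hc1, hc50⟩ := hcs c (List.mem_cons_self ..)
    simp only [List.foldl_cons]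
    apply ih (fun c hc => hcs c (List.mem_cons_of_mem _ hc))
    all_goals
      have hg : (gcnt (n - c) : Int) + 1 = ((gcnt (n - 50 - c) : Int) + 1) + 1 := by
        have := gcnt_shift (n - c) (by omega)
        have hnn : n - c - 50 = n - 50 - c := by omega
        rw [hnn] at this
        push_cast [this]
        ring
      have hcond : pyInfLt (some ((gcnt (n - c) : Int) + 1)) s.1
          = pyInfLt (some ((gcnt (n - 50 - c) : Int) + 1)) s'.1 := by
        rw [hg, h1, pyInfLt_map]
      have hdict : bump (GD (n - c)) (c : Int) = bump (bump (GD (n - 50 - c)) (c : Int)) 50 := by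
        have hnn : n - c - 50 = n - 50 - c := by omega
        rw [GD_shift (n - c) (by omega), hnn,
          bump_comm _ _ (contains50_GD (n - 50 - c) (by omega))]
      unfold chain1
      rw [if_pos (by omega : c ≤ n), if_pos (by omega : c ≤ n - 50), hcond]
      by_cases himp : pyInfLt (some ((gcnt (n - 50 - c) : Int) + 1)) s'.1 = true
      · simp only [himp, if_true]
        first
          | (simp only [Option.map_some]; exact congrArg some hg)
          | exact hdict
      · simp only [himp]
        first
          | exact h1
          | exact h2

set_option maxRecDepth 40000 in
lemma chain_base : ∀ n : Nat, n < 150 → 1 ≤ n → chainRes n = (some (gcnt n : Int), GD n) := by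
  decide

lemma chain_shift (n : Nat) (h : 150 ≤ n) :
    chainRes n = ((chainRes (n - 50)).1.map (· + 1), bump (chainRes (n - 50)).2 50) := by
  have h11 : chain1 n (none, PySem.Dict.empty) 1
      = (some ((gcnt (n - 1) : Int) + 1), bump (GD (n - 1)) 1) := by
    unfold chain1
    rw [if_pos (by omega : 1 ≤ n)]
    simp [pyInfLt]
  have h11' : chain1 (n - 50) (none, PySem.Dict.empty) 1
      = (some ((gcnt (n - 50 - 1) : Int) + 1), bump (GD (n - 50 - 1)) 1) := by
    unfold chain1
    rw [if_pos (by omega : 1 ≤ n - 50)]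
    simp [pyInfLt]
  unfold chainRes
  simp only [List.foldl_cons, h11, h11']
  apply chain_shift_aux n h [2, 5, 10, 20, 50] (by intro c hc; fin_cases hc <;> omega)
  · have : n - 1 - 50 = n - 50 - 1 := by omega
    rw [gcnt_shift (n - 1) (by omega), this]
    push_cast
    rfl
  · have : n - 1 - 50 = n - 50 - 1 := by omega
    rw [GD_shift (n - 1) (by omega), this,
      bump_comm _ _ (contains50_GD (n - 50 - 1) (by omega))]

lemma chain_correct (n : Nat) (h : 1 ≤ n) : chainRes n = (some (gcnt n : Int), GD n) := by
  induction n using Nat.strong_induction_on with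
  | _ n ih =>
    by_cases hlt : n < 150
    · exact chain_base n hlt h
    · rw [chain_shift n (by omega), ih (n - 50) (by omega) (by omega)]
      have hg : (gcnt (n - 50) : Int) + 1 = (gcnt n : Int) := by
        rw [gcnt_shift n (by omega)]
        push_cast
        ring
      rw [← GD_shift n (by omega)]
      simp [hg]

-- ===== A-side table building =====

lemma set_self_of_getElem? {α : Type} (l : List α) (n : Nat) (a : α)
    (h : l[n]? = some a) : l.set n a = l := by
  apply List.ext_getElem?
  intro m
  by_cases hm : n = m
  · subst hm
    obtain ⟨hlt, -⟩ := List.getElem?_eq_some_iff.mp h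
    rw [List.getElem?_set_self hlt, h]
  · rw [List.getElem?_set_ne hm]

lemma gd_zero : GD 0 = PySem.Dict.empty := by decide

-- A's inner-loop body, named (definitionally the lambda inside find_min_coins)
def stepA (i : Int) (st : List (Option Int) × List (PySem.Dict Int Int)) (coin : Int) :
    List (Option Int) × List (PySem.Dict Int Int) :=
  if coin ≤ i then
    let prev := PySem.List.pyGetD st.1 (i - coin) none
    let cur := PySem.List.pyGetD st.1 i none
    if pyInfLt (prev.map (· + 1)) cur then
      let nd := PySem.List.pyGetD st.2 (i - coin) PySem.Dict.empty
      let nd := if nd.contains coin then nd.modify coin 0 (· + 1) else nd.insert coin 1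
      (st.1.set i.toNat (prev.map (· + 1)), st.2.set i.toNat nd)
    else st
  else st

-- the whole table computation of A, named
def tableA (n k : Nat) : List (Option Int) × List (PySem.Dict Int Int) :=
  (PySem.List.pyRange 1 ((k : Int) + 1) 1).foldl
    (fun st i => (([1, 2, 5, 10, 20, 50] : List Int)).foldl (stepA i) st)
    ((List.replicate (n + 1) (none : Option Int)).set 0 (some 0),
      List.replicate (n + 1) (PySem.Dict.empty : PySem.Dict Int Int))

lemma arr_getD {α : Type} (a : Array α) (i : Nat) (d : α) :
    a.getD i d = a.toList.getD i d := by
  unfold Array.getD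
  split
  · rw [List.getD_eq_getElem?_getD, List.getElem?_eq_getElem (by simpa using ‹_›)]
    simp [Array.getElem_toList]
  · rw [List.getD_eq_getElem?_getD, List.getElem?_eq_none (by simpa using Nat.le_of_not_lt ‹_›)]
    rfl

-- A's inner-loop body on arrays, named (definitionally the lambda inside find_min_coins)
def stepArr (i : Int) (st : Array (Option Int) × Array (PySem.Dict Int Int)) (coin : Int) :
    Array (Option Int) × Array (PySem.Dict Int Int) :=
  if coin ≤ i then
    let prev := st.1.getD (i - coin).toNat none
    let cur := st.1.getD i.toNat none
    if pyInfLt (prev.map (· + 1)) cur then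
      let nd := st.2.getD (i - coin).toNat PySem.Dict.empty
      let nd := if nd.contains coin then nd.modify coin 0 (· + 1) else nd.insert coin 1
      (st.1.setIfInBounds i.toNat (prev.map (· + 1)), st.2.setIfInBounds i.toNat nd)
    else st
  else st

lemma stepArr_toList (i : Int) (hi : 0 ≤ i)
    (st : Array (Option Int) × Array (PySem.Dict Int Int)) (coin : Int) :
    ((stepArr i st coin).1.toList, (stepArr i st coin).2.toList)
      = stepA i (st.1.toList, st.2.toList) coin := by
  unfold stepArr stepA
  by_cases hc : coin ≤ i
  · rw [if_pos hc, if_pos hc]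
    have hsub : i - coin = (((i - coin).toNat : Nat) : Int) := by omega
    have hii : i = ((i.toNat : Nat) : Int) := by omega
    have hprev : PySem.List.pyGetD st.1.toList (i - coin) none = st.1.getD (i - coin).toNat none := by
      rw [arr_getD]
      conv_lhs => rw [hsub]
      rw [PySem.List.pyGetD_natCast]
    have hcur : PySem.List.pyGetD st.1.toList i none = st.1.getD i.toNat none := by
      rw [arr_getD]
      conv_lhs => rw [hii]
      rw [PySem.List.pyGetD_natCast]
    have hnd : PySem.List.pyGetD st.2.toList (i - coin) PySem.Dict.empty
        = st.2.getD (i - coin).toNat PySem.Dict.empty := by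
      rw [arr_getD]
      conv_lhs => rw [hsub]
      rw [PySem.List.pyGetD_natCast]
    rw [hprev, hcur, hnd]
    dsimp only
    split_ifs with h <;> simp [Array.toList_setIfInBounds]
  · rw [if_neg hc, if_neg hc]

lemma innerArr_toList (i : Int) (hi : 0 ≤ i) (cs : List Int)
    (st : Array (Option Int) × Array (PySem.Dict Int Int)) :
    ((cs.foldl (stepArr i) st).1.toList, (cs.foldl (stepArr i) st).2.toList)
      = cs.foldl (stepA i) (st.1.toList, st.2.toList) := by
  induction cs generalizing st with
  | nil => rfl
  | cons c cs ih =>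
    simp only [List.foldl_cons]
    rw [ih, stepArr_toList i hi st c]

lemma foldArr_toList (l : List Int) (hl : ∀ x ∈ l, 0 ≤ x)
    (st : Array (Option Int) × Array (PySem.Dict Int Int)) :
    ((l.foldl (fun st i => (([1, 2, 5, 10, 20, 50] : List Int)).foldl (stepArr i) st) st).1.toList,
     (l.foldl (fun st i => (([1, 2, 5, 10, 20, 50] : List Int)).foldl (stepArr i) st) st).2.toList)
      = l.foldl (fun st i => (([1, 2, 5, 10, 20, 50] : List Int)).foldl (stepA i) st)
          (st.1.toList, st.2.toList) := by
  induction l generalizing st with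
  | nil => rfl
  | cons x l ih =>
    have hl' : ∀ y ∈ l, (0 : Int) ≤ y := fun y hy => hl y (List.mem_cons_of_mem _ hy)
    refine (ih hl' (([1, 2, 5, 10, 20, 50] : List Int).foldl (stepArr x) st)).trans ?_
    rw [innerArr_toList x (hl x (List.mem_cons_self ..))]
    rfl

lemma find_min_coins_eq (amount : Int) (n : Nat) (h : amount = (n : Int)) :
    find_min_coins amount
      = (PySem.List.pyGetD (tableA n n).2 amount PySem.Dict.empty).items := by
  subst h
  have ht : ((n : Int) + 1).toNat = n + 1 := by omega
  show (((PySem.List.pyRange 1 ((n : Int) + 1) 1).foldl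
      (fun st i => (([1, 2, 5, 10, 20, 50] : List Int)).foldl (stepArr i) st)
      ((Array.replicate ((n : Int) + 1).toNat (none : Option Int)).setIfInBounds 0 (some 0),
        Array.replicate ((n : Int) + 1).toNat PySem.Dict.empty)).2.getD
      ((n : Int)).toNat PySem.Dict.empty).items = _
  have hrng : ∀ x ∈ PySem.List.pyRange 1 ((n : Int) + 1) 1, (0 : Int) ≤ x := by
    intro x hx
    have := (PySem.List.mem_pyRange_one.mp hx).1
    omega
  have hb2 : ((PySem.List.pyRange 1 ((n : Int) + 1) 1).foldl
      (fun st i => (([1, 2, 5, 10, 20, 50] : List Int)).foldl (stepArr i) st)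
      ((Array.replicate ((n : Int) + 1).toNat (none : Option Int)).setIfInBounds 0 (some 0),
        Array.replicate ((n : Int) + 1).toNat PySem.Dict.empty)).2.toList
      = ((PySem.List.pyRange 1 ((n : Int) + 1) 1).foldl
      (fun st i => (([1, 2, 5, 10, 20, 50] : List Int)).foldl (stepA i) st)
      (((Array.replicate ((n : Int) + 1).toNat (none : Option Int)).setIfInBounds 0 (some 0)).toList,
        (Array.replicate ((n : Int) + 1).toNat (PySem.Dict.empty : PySem.Dict Int Int)).toList)).2 :=
    congrArg Prod.snd (foldArr_toList _ hrng _)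
  rw [arr_getD, hb2]
  simp only [Array.toList_setIfInBounds, Array.toList_replicate, ht]
  rw [show PySem.List.pyGetD (tableA n n).2 ((n : Nat) : Int) PySem.Dict.empty
      = (tableA n n).2.getD n PySem.Dict.empty from PySem.List.pyGetD_natCast _ n _]
  rw [show ((n : Int)).toNat = n by omega]
  rfl

lemma stepA_char (n c : Nat) (h1 : 1 ≤ n) (hc1 : 1 ≤ c)
    (dp : List (Option Int)) (cu : List (PySem.Dict Int Int))
    (hdl : n < dp.length) (_hcl : n < cu.length)
    (hdp : ∀ j : Nat, j < n → dp[j]? = some (some ((gcnt j : Int))) ∧ cu[j]? = some (GD j))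
    (sC : Option Int × PySem.Dict Int Int) :
    stepA (n : Int) (dp.set n sC.1, cu.set n sC.2) (c : Int)
      = (dp.set n (chain1 n sC c).1, cu.set n (chain1 n sC c).2) := by
  unfold stepA chain1
  have htn : ((n : Int)).toNat = n := by omega
  by_cases hcn : c ≤ n
  · have hsub : (n : Int) - (c : Int) = ((n - c : Nat) : Int) := by omega
    have hprev : PySem.List.pyGetD (dp.set n sC.1) ((n : Int) - (c : Int)) none
        = some ((gcnt (n - c) : Int)) := by
      rw [hsub, PySem.List.pyGetD_natCast, List.getD_eq_getElem?_getD,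
        List.getElem?_set_ne (by omega : n ≠ n - c), (hdp (n - c) (by omega)).1]
      rfl
    have hcur : PySem.List.pyGetD (dp.set n sC.1) (n : Int) none = sC.1 := by
      rw [PySem.List.pyGetD_natCast, List.getD_eq_getElem?_getD,
        List.getElem?_set_self (by simpa using hdl)]
      rfl
    have hnd : PySem.List.pyGetD (cu.set n sC.2) ((n : Int) - (c : Int)) PySem.Dict.empty
        = GD (n - c) := by
      rw [hsub, PySem.List.pyGetD_natCast, List.getD_eq_getElem?_getD,
        List.getElem?_set_ne (by omega : n ≠ n - c), (hdp (n - c) (by omega)).2]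
      rfl
    rw [if_pos (by omega : (c : Int) ≤ (n : Int)), if_pos hcn]
    simp only [hprev, hcur, hnd, Option.map_some, htn, List.set_set]
    split_ifs with h hc2
    · simp [bump, hc2]
    · simp [bump, hc2]
    · rfl
  · rw [if_neg (by omega : ¬ (c : Int) ≤ (n : Int)), if_neg hcn]

lemma inner_aux (n : Nat) (h1 : 1 ≤ n)
    (dp : List (Option Int)) (cu : List (PySem.Dict Int Int))
    (hdl : n < dp.length) (hcl : n < cu.length)
    (hdp : ∀ j : Nat, j < n → dp[j]? = some (some ((gcnt j : Int))) ∧ cu[j]? = some (GD j))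
    (cs : List Nat) (hcs : ∀ c ∈ cs, 1 ≤ c) (sC : Option Int × PySem.Dict Int Int) :
    cs.foldl (fun st (c : Nat) => stepA (n : Int) st (c : Int)) (dp.set n sC.1, cu.set n sC.2)
      = (dp.set n (cs.foldl (chain1 n) sC).1, cu.set n (cs.foldl (chain1 n) sC).2) := by
  induction cs generalizing sC with
  | nil => simp
  | cons c cs ih =>
    simp only [List.foldl_cons]
    rw [stepA_char n c h1 (hcs c (List.mem_cons_self ..)) dp cu hdl hcl hdp sC]
    exact ih (fun c hc => hcs c (List.mem_cons_of_mem _ hc)) _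

lemma build_table (n k : Nat) (hk : k ≤ n) :
    (tableA n k).1.length = n + 1 ∧ (tableA n k).2.length = n + 1
    ∧ (∀ j : Nat, j ≤ k →
        (tableA n k).1[j]? = some (some ((gcnt j : Int)))
        ∧ (tableA n k).2[j]? = some (GD j))
    ∧ (∀ j : Nat, k < j → j ≤ n →
        (tableA n k).1[j]? = some none ∧ (tableA n k).2[j]? = some PySem.Dict.empty) := by
  induction k with
  | zero =>
    unfold tableA
    rw [PySem.List.pyRange_one_eq_nil (by omega)]
    simp only [List.foldl_nil]
    refine ⟨by simp, by simp, ?_, ?_⟩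
    · intro j hj
      interval_cases j
      refine ⟨?_, ?_⟩
      · rw [List.getElem?_set_self (by simp)]
        norm_num [gcnt]
      · rw [List.getElem?_replicate, if_pos (by omega), gd_zero]
    · intro j hj hjn
      refine ⟨?_, ?_⟩
      · rw [List.getElem?_set_ne (by omega), List.getElem?_replicate, if_pos (by omega)]
      · rw [List.getElem?_replicate, if_pos (by omega)]
  | succ k ih =>
    obtain ⟨hl1, hl2, hlow, hhigh⟩ := ih (by omega)
    have hsplit : PySem.List.pyRange 1 ((k : Int) + 1 + 1) 1
        = PySem.List.pyRange 1 ((k : Int) + 1) 1 ++ [(k : Int) + 1] := by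
      have := PySem.List.pyRange_one_succ_right (a := 1) (b := (k : Int) + 1) (by omega)
      simpa using this
    have hcast : ((k : Int) + 1) = ((k + 1 : Nat) : Int) := by push_cast; ring
    have hcoins : (([1, 2, 5, 10, 20, 50] : List Int))
        = List.map Int.ofNat [1, 2, 5, 10, 20, 50] := by decide
    have hTA : tableA n (k + 1)
        = (([1, 2, 5, 10, 20, 50] : List Int)).foldl (stepA ((k : Int) + 1)) (tableA n k) := by
      unfold tableA
      rw [show ((k + 1 : Nat) : Int) + 1 = (k : Int) + 1 + 1 by push_cast; ring, hsplit,
        List.foldl_append]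
      rfl
    have hset1 : (tableA n k).1 = (tableA n k).1.set (k + 1) none :=
      (set_self_of_getElem? _ _ _ (hhigh (k + 1) (by omega) (by omega)).1).symm
    have hset2 : (tableA n k).2 = (tableA n k).2.set (k + 1) PySem.Dict.empty :=
      (set_self_of_getElem? _ _ _ (hhigh (k + 1) (by omega) (by omega)).2).symm
    have hpair : tableA n k
        = ((tableA n k).1.set (k + 1) none, (tableA n k).2.set (k + 1) PySem.Dict.empty) := by
      rw [← hset1, ← hset2]
    have hdp : ∀ j : Nat, j < k + 1 →
        (tableA n k).1[j]? = some (some ((gcnt j : Int)))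
        ∧ (tableA n k).2[j]? = some (GD j) := fun j hj => hlow j (by omega)
    have hres : tableA n (k + 1)
        = ((tableA n k).1.set (k + 1) (chainRes (k + 1)).1,
           (tableA n k).2.set (k + 1) (chainRes (k + 1)).2) := by
      rw [hTA, hcoins, hcast, List.foldl_map]
      conv_lhs => rw [hpair]
      exact inner_aux (k + 1) (by omega) _ _ (by omega) (by omega) hdp
        [1, 2, 5, 10, 20, 50] (by intro c hc; fin_cases hc <;> omega) (none, PySem.Dict.empty)
    have hchain := chain_correct (k + 1) (by omega)
    refine ⟨?_, ?_, ?_, ?_⟩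
    · rw [hres]; simpa using hl1
    · rw [hres]; simpa using hl2
    · intro j hj
      rw [hres]
      by_cases hjk : j = k + 1
      · subst hjk
        refine ⟨?_, ?_⟩
        · rw [List.getElem?_set_self (by omega), hchain]
        · rw [List.getElem?_set_self (by omega), hchain]
      · rw [List.getElem?_set_ne (by omega), List.getElem?_set_ne (by omega)]
        exact hlow j (by omega)
    · intro j hj hjn
      rw [hres]
      rw [List.getElem?_set_ne (by omega), List.getElem?_set_ne (by omega)]
      exact hhigh j (by omega) hjn

lemma portA_eq_GD (amount : Int) (n : Nat) (h : amount = (n : Int)) :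
    find_min_coins amount = (GD n).items := by
  rw [find_min_coins_eq amount n h, h]
  obtain ⟨-, hl2, hlow, -⟩ := build_table n n le_rfl
  rw [PySem.List.pyGetD_natCast, List.getD_eq_getElem?_getD, (hlow n le_rfl).2]
  rfl

lemma portB_eq_GD (amount : Int) (n : Nat) (h : amount = (n : Int)) :
    find_min_coins_alt amount = (GD n).items := by
  subst h
  unfold find_min_coins_alt GD
  simp only [List.foldl_cons, List.foldl_nil]
  have f50 : PySem.Int.floordiv (n : Int) 50 = ((n / 50 : Nat) : Int) := by
    exact_mod_cast PySem.Int.floordiv_natCast n 50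
  have m50 : PySem.Int.mod (n : Int) 50 = ((n % 50 : Nat) : Int) := by
    exact_mod_cast PySem.Int.mod_natCast n 50
  have f20 : PySem.Int.floordiv ((n % 50 : Nat) : Int) 20 = ((n % 50 / 20 : Nat) : Int) := by
    exact_mod_cast PySem.Int.floordiv_natCast (n % 50) 20
  have m20 : PySem.Int.mod ((n % 50 : Nat) : Int) 20 = ((n % 50 % 20 : Nat) : Int) := by
    exact_mod_cast PySem.Int.mod_natCast (n % 50) 20
  have f10 : PySem.Int.floordiv ((n % 50 % 20 : Nat) : Int) 10
      = ((n % 50 % 20 / 10 : Nat) : Int) := by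
    exact_mod_cast PySem.Int.floordiv_natCast (n % 50 % 20) 10
  have m10 : PySem.Int.mod ((n % 50 % 20 : Nat) : Int) 10
      = ((n % 50 % 20 % 10 : Nat) : Int) := by
    exact_mod_cast PySem.Int.mod_natCast (n % 50 % 20) 10
  have f5 : PySem.Int.floordiv ((n % 50 % 20 % 10 : Nat) : Int) 5
      = ((n % 50 % 20 % 10 / 5 : Nat) : Int) := by
    exact_mod_cast PySem.Int.floordiv_natCast (n % 50 % 20 % 10) 5
  have m5 : PySem.Int.mod ((n % 50 % 20 % 10 : Nat) : Int) 5
      = ((n % 50 % 20 % 10 % 5 : Nat) : Int) := by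
    exact_mod_cast PySem.Int.mod_natCast (n % 50 % 20 % 10) 5
  have f2 : PySem.Int.floordiv ((n % 50 % 20 % 10 % 5 : Nat) : Int) 2
      = ((n % 50 % 20 % 10 % 5 / 2 : Nat) : Int) := by
    exact_mod_cast PySem.Int.floordiv_natCast (n % 50 % 20 % 10 % 5) 2
  have m2 : PySem.Int.mod ((n % 50 % 20 % 10 % 5 : Nat) : Int) 2
      = ((n % 50 % 20 % 10 % 5 % 2 : Nat) : Int) := by
    exact_mod_cast PySem.Int.mod_natCast (n % 50 % 20 % 10 % 5) 2
  have f1 : PySem.Int.floordiv ((n % 50 % 20 % 10 % 5 % 2 : Nat) : Int) 1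
      = ((n % 50 % 20 % 10 % 5 % 2 : Nat) : Int) := by
    rw [show ((1 : Int)) = ((1 : Nat) : Int) from rfl, PySem.Int.floordiv_natCast]
    norm_num
  rw [f50, m50, f20, m20, f10, m10, f5, m5, f2, m2, f1]
  have hfold : ∀ (ps : List (Int × Nat)) (d : PySem.Dict Int Int),
      (∀ p ∈ ps, d.contains p.1 = false) → (ps.map (·.1)).Nodup →
      (ps.foldl (fun d p => if ((p.2 : Nat) : Int) ≠ 0 then d.insert p.1 ((p.2 : Nat) : Int) else d) d).items
        = d.items ++ ps.foldr (fun p acc =>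
            (if p.2 = 0 then [] else [(p.1, ((p.2 : Nat) : Int))]) ++ acc) [] := by
    intro ps
    induction ps with
    | nil => intro d _ _; simp
    | cons p ps ih =>
      intro d hf hnd
      obtain ⟨hnotmem, hnd'⟩ : (∀ x : Nat, (p.1, x) ∉ ps) ∧ (List.map (fun x => x.1) ps).Nodup := by
        simpa using hnd
      simp only [List.foldl_cons, List.foldr_cons]
      by_cases hp : p.2 = 0
      · rw [if_neg (by simp [hp]), if_pos hp, List.nil_append]
        exact ih d (fun q hq => hf q (List.mem_cons_of_mem _ hq)) hnd'
      · rw [if_pos (by simpa using hp), if_neg hp]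
        have hfresh : ∀ q ∈ ps, ((d.insert p.1 ((p.2 : Nat) : Int)).contains q.1) = false := by
          intro q hq
          rw [PySem.Dict.contains_insert]
          have hne : q.1 ≠ p.1 := by
            intro hcontra
            have hq' : (p.1, q.2) = q := by rw [← hcontra]
            exact hnotmem q.2 (hq' ▸ hq)
          simp [hne, hf q (List.mem_cons_of_mem _ hq)]
        rw [ih _ hfresh hnd',
          PySem.Dict.items_insert_of_not_contains _ _ (hf p (List.mem_cons_self ..))]
        simp
  have happ := hfold [((50 : Int), n / 50), (20, n % 50 / 20), (10, n % 50 % 20 / 10),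
      (5, n % 50 % 20 % 10 / 5), (2, n % 50 % 20 % 10 % 5 / 2), (1, n % 50 % 20 % 10 % 5 % 2)]
      PySem.Dict.empty (by simp) (by simp)
  simp only [List.foldl_cons, List.foldl_nil, List.foldr_cons, List.foldr_nil] at happ
  rw [happ]
  simp [show PySem.Dict.empty.items = ([] : List (Int × Int)) from rfl]

theorem find_min_coins_spec : Claim_equal_find_min_coins := by
  intro amount hdom hpre
  unfold Spec_find_min_coins
  have hn : amount = ((amount.toNat : Nat) : Int) := (Int.toNat_of_nonneg hpre).symm
  rw [portA_eq_GD amount amount.toNat hn, portB_eq_GD amount amount.toNat hn]
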